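-- pv_equiv track=rewrite | github.com/Ratnakar-7/Codeforces-practice-I | A_LuoTianyi_and_the_Palindrome_String.py | find_longest_non_palindrome_subsequence
-- ===== SOURCE A (Python) =====
-- def find_longest_non_palindrome_subsequence(s):
--     char_count = {}
--     for char in s:
--         if char in char_count:
--             char_count[char] += 1
--         else:
--             char_count[char] = 1
--
--     has_unique_char = False
--     for count in char_count.values():
--         if count == 1:
--             has_unique_char = True
--             break
--
--     if has_unique_char:
--         return len(s) - 1
--     else:
--         return -1
-- ===== SOURCE B (Python) =====
-- def find_longest_non_palindrome_subsequence(s):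
--     # Sort the characters so equal characters become contiguous runs, then
--     # scan the runs: a run of length exactly 1 means some char occurs once.
--     def has_singleton_run(t):
--         if not t:
--             return False
--         run = 1
--         while run < len(t) and t[run] == t[0]:
--             run += 1
--         if run == 1:
--             return True
--         return has_singleton_run(t[run:])
--     return len(s) - 1 if has_singleton_run(sorted(s)) else -1
-- ===== Notes on version B (the rewrite author's own statement) =====
-- stated objective: alternative
-- what changed: Replaces the frequency dictionary with sort-then-run-length-scan: the characters are sorted so equal characters are contiguous, and a recursive scan over the runs looks for a run of length exactly 1.
import Mathlib
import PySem

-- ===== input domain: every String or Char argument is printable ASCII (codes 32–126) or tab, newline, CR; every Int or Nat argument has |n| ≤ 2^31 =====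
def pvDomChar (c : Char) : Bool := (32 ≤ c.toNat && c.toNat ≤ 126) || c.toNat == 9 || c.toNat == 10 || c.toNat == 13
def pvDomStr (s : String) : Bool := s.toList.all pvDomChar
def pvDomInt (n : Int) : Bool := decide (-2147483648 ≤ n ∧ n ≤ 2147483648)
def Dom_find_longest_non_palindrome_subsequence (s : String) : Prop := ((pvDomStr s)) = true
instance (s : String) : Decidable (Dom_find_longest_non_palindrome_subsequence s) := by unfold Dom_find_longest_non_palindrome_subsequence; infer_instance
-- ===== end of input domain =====

-- B replaces A's frequency dictionary with sort-then-run-length-scan: it sorts the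
-- characters and recursively scans the runs for a run of length exactly 1 (objective:
-- alternative algorithm, similar cost).


-- ===== PORT A =====
-- the 'for count in char_count.values(): if count == 1: … break' loop
def pvScanVals : List Int → Bool
  | [] => false
  | v :: rest => if v == 1 then true else pvScanVals rest

def find_longest_non_palindrome_subsequence (s : String) : Int :=
  let char_count : PySem.Dict Char Int :=
    s.toList.foldl
      (fun d c =>
        if PySem.Dict.contains d c then PySem.Dict.insert d c (PySem.Dict.getD d c 0 + 1)
        else PySem.Dict.insert d c 1)
      PySem.Dict.empty
  let has_unique_char := pvScanVals (PySem.Dict.values char_count)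
  if has_unique_char then (PySem.Str.len s : Int) - 1 else -1

-- ===== PORT B =====
-- 'run' counts how far t[0] repeats: run = 1 + length of the leading block of t[0] in t[1:];
-- then recurse on t[run:].
def pvHasSingletonRun : List Char → Bool
  | [] => false
  | c :: rest =>
      let run := 1 + (rest.takeWhile (fun x => x == c)).length
      if run == 1 then true
      else pvHasSingletonRun ((c :: rest).drop run)
  termination_by t => t.length
  decreasing_by
    simp only [List.length_drop, List.length_cons]
    have := List.Sublist.length_le (List.takeWhile_sublist (p := fun x => x == c) (l := rest))
    omega

def find_longest_non_palindrome_subsequence_alt (s : String) : Int :=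
  if pvHasSingletonRun (PySem.List.sorted s.toList (fun x => x) false) then
    (PySem.Str.len s : Int) - 1
  else -1

-- ===== PRECONDITION & SPEC =====
def Spec_find_longest_non_palindrome_subsequence (s : String) (out : Int) : Prop := out = find_longest_non_palindrome_subsequence_alt s
instance (s : String) (out : Int) : Decidable (Spec_find_longest_non_palindrome_subsequence s out) := by unfold Spec_find_longest_non_palindrome_subsequence; infer_instance

-- ===== CLAIM (what is proved, stated in full; the proofs are below) =====
def Claim_equal_find_longest_non_palindrome_subsequence : Prop := ∀ (s : String), Dom_find_longest_non_palindrome_subsequence s → Spec_find_longest_non_palindrome_subsequence s (find_longest_non_palindrome_subsequence s)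

-- ===== LEMMAS AND PROOFS =====

-- A's dict-building loop builds collections.Counter(s)
theorem pvFold_eq_counter (xs : List Char) :
    xs.foldl
      (fun d c =>
        if PySem.Dict.contains d c then PySem.Dict.insert d c (PySem.Dict.getD d c 0 + 1)
        else PySem.Dict.insert d c 1)
      PySem.Dict.empty = PySem.Dict.counter xs := by
  rw [← PySem.Dict.foldl_insert_getD_add_one_eq_counter]
  congr 1
  funext d c
  by_cases h : PySem.Dict.contains d c
  · simp [h]
  · have hg : PySem.Dict.getD d c 0 = 0 := by
      have : PySem.Dict.get? d c = none := by
        have := PySem.Dict.contains_eq_isSome_get? (d := d) (k := c)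
        simp [h] at this
        exact Option.not_isSome_iff_eq_none.mp (by simp [← this])
      simp [PySem.Dict.getD, this]
    simp [h, hg]

theorem pvScanVals_eq_any (vs : List Int) : pvScanVals vs = vs.any (fun v => v == 1) := by
  induction vs with
  | nil => rfl
  | cons v rest ih =>
      by_cases h : v = 1 <;> simp [pvScanVals, h, ih]

-- A's test says: some character of the string occurs exactly once
theorem pvA_exists (l : List Char) :
    ((PySem.Set.ofList l).any (fun c => (l.count c : Int) == 1)) = true ↔
      ∃ c, l.count c = 1 := by
  simp only [List.any_eq_true, PySem.Set.mem_ofList, beq_iff_eq]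
  constructor
  · rintro ⟨c, _, hc⟩; exact ⟨c, by exact_mod_cast hc⟩
  · rintro ⟨c, hc⟩
    exact ⟨c, List.count_pos_iff.mp (by omega), by exact_mod_cast hc⟩

-- in a ≤-sorted list whose elements are all ≥ c, the part after dropping the leading c's has no c
theorem pvNotMemDrop (c : Char) (l : List Char) (hs : l.Pairwise (· ≤ ·))
    (hge : ∀ y ∈ l, c ≤ y) : c ∉ l.dropWhile (fun x => x == c) := by
  induction l with
  | nil => simp
  | cons x xs ih =>
      by_cases hx : x = c
      · subst hx
        rw [List.dropWhile_cons_of_pos (by simp)]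
        exact ih hs.tail (fun y hy => hge y (List.mem_cons_of_mem _ hy))
      · rw [List.dropWhile_cons_of_neg (by simp [hx])]
        intro hmem
        rcases List.mem_cons.mp hmem with h | h
        · exact hx h.symm
        · have hxy : x ≤ c := (List.pairwise_cons.mp hs).1 c h
          have hcx : c ≤ x := hge x (List.mem_cons_self)
          exact hx (le_antisymm hxy hcx)

-- the leading block of c's really is all c
theorem pvTakeAll (c : Char) (l : List Char) :
    ∀ y ∈ l.takeWhile (fun x => x == c), y = c := by
  intro y hy
  have := List.mem_takeWhile_imp hy
  simpa using this

-- the run scan finds a run of length 1 iff some char has count 1 (sorted input)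
theorem pvRun_spec_aux (n : ℕ) : ∀ (t : List Char), t.length ≤ n → t.Pairwise (· ≤ ·) →
    (pvHasSingletonRun t = true ↔ ∃ c, t.count c = 1) := by
  induction n with
  | zero =>
      intro t hlen _
      have : t = [] := List.eq_nil_of_length_eq_zero (Nat.le_zero.mp hlen)
      subst this
      simp [pvHasSingletonRun]
  | succ n ih =>
      intro t hlen hs
      match t with
      | [] => simp [pvHasSingletonRun]
      | c :: rest =>
          set w := rest.takeWhile (fun x => x == c) with hw
          set d := rest.dropWhile (fun x => x == c) with hd
          have hsplit : rest = w ++ d := (List.takeWhile_append_dropWhile).symm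
          have hdrop : (c :: rest).drop (1 + w.length) = d := by
            rw [Nat.add_comm, List.drop_succ_cons, hsplit, List.drop_left]
          have hge : ∀ y ∈ rest, c ≤ y := (List.pairwise_cons.mp hs).1
          have hnotmem : c ∉ d := pvNotMemDrop c rest hs.tail hge
          have hds : d.Pairwise (· ≤ ·) :=
            hs.tail.sublist (List.dropWhile_sublist _)
          have hcount_c : (c :: rest).count c = 1 + w.length := by
            rw [hsplit, List.count_cons_self, List.count_append]
            have h1 : w.count c = w.length := List.count_eq_length.mpr
              (fun y hy => by simp [pvTakeAll c rest y hy])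
            have h2 : d.count c = 0 := List.count_eq_zero.mpr hnotmem
            omega
          have hcount_ne : ∀ c', c' ≠ c → (c :: rest).count c' = d.count c' := by
            intro c' hne
            rw [hsplit, List.count_cons_of_ne hne.symm, List.count_append]
            have : w.count c' = 0 := List.count_eq_zero.mpr
              (fun hmem => hne (pvTakeAll c rest c' hmem))
            omega
          by_cases hk : w.length = 0
          · -- a run of length 1: both sides true
            have hrun : pvHasSingletonRun (c :: rest) = true := by
              rw [pvHasSingletonRun]
              simp [← hw, hk]
            rw [hrun]
            simp only [true_iff]
            exact ⟨c, by omega⟩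
          · have hrun : pvHasSingletonRun (c :: rest) = pvHasSingletonRun d := by
              rw [pvHasSingletonRun]
              rw [if_neg (by simp only [← hw, beq_iff_eq]; omega)]
              rw [← hw, hdrop]
            have hdlen : d.length ≤ n := by
              have h1 : rest.length = w.length + d.length := by
                rw [hsplit, List.length_append]
              have h2 : rest.length + 1 ≤ n + 1 := by simpa using hlen
              omega
            rw [hrun, ih d hdlen hds]
            constructor
            · rintro ⟨c', hc'⟩
              by_cases hne : c' = c
              · subst hne
                have h0 : d.count c' = 0 := List.count_eq_zero.mpr hnotmem
                omega
              · exact ⟨c', (hcount_ne c' hne).trans hc'⟩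
            · rintro ⟨c', hc'⟩
              by_cases hne : c' = c
              · subst hne; omega
              · exact ⟨c', (hcount_ne c' hne).symm.trans hc'⟩

-- ===== VERDICT (by name: the statement is the Claim_ definition above) =====
theorem find_longest_non_palindrome_subsequence_spec : Claim_equal_find_longest_non_palindrome_subsequence := by
  intro s _
  unfold Spec_find_longest_non_palindrome_subsequence
  unfold find_longest_non_palindrome_subsequence find_longest_non_palindrome_subsequence_alt
  rw [pvFold_eq_counter]
  simp only [pvScanVals_eq_any]
  have hv : PySem.Dict.values (PySem.Dict.counter s.toList) =
      (PySem.Set.ofList s.toList).map (fun k => (s.toList.count k : Int)) := by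
    simp [PySem.Dict.values, PySem.Dict.items_counter]
  have hA : (PySem.Dict.values (PySem.Dict.counter s.toList)).any (fun v => v == 1) =
      (PySem.Set.ofList s.toList).any (fun c => (s.toList.count c : Int) == 1) := by
    rw [hv, List.any_map]
    rfl
  set t := PySem.List.sorted s.toList (fun x => x) false with ht
  have htp : t.Pairwise (· ≤ ·) := by
    have := PySem.List.sorted_pairwise (xs := s.toList) (key := fun x : Char => x)
    simpa using this
  have htc : ∀ c, t.count c = s.toList.count c := fun c =>
    (PySem.List.sorted_perm (xs := s.toList) (key := fun x : Char => x) (rev := false)).count_eq c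
  have hB : pvHasSingletonRun t = true ↔ ∃ c, s.toList.count c = 1 := by
    rw [pvRun_spec_aux t.length t le_rfl htp]
    exact ⟨fun ⟨c, h⟩ => ⟨c, (htc c).symm.trans h⟩, fun ⟨c, h⟩ => ⟨c, (htc c).trans h⟩⟩
  have hcond : (PySem.Dict.values (PySem.Dict.counter s.toList)).any (fun v => v == 1) =
      pvHasSingletonRun t := by
    rw [hA]
    by_cases h : ∃ c, s.toList.count c = 1
    · rw [(pvA_exists s.toList).mpr h, (hB.mpr h)]
    · have h1 : ((PySem.Set.ofList s.toList).any (fun c => (s.toList.count c : Int) == 1)) = false := by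
        rw [Bool.eq_false_iff]
        intro hx
        exact h ((pvA_exists s.toList).mp hx)
      have h2 : pvHasSingletonRun t = false := by
        rw [Bool.eq_false_iff]
        intro hx
        exact h (hB.mp hx)
      rw [h1, h2]
  rw [hcond]
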